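-- pv_equiv track=rewrite | github.com/moiz67932/moiz-dental-ai-agent | agent_v2 copy.py | get_duration_for_service
-- ===== SOURCE A (Python) =====
-- from typing import Optional, Tuple, Dict, Any, List
--
-- DEFAULT_TREATMENT_DURATIONS: Dict[str, int] = {
--     "Teeth whitening": 60,
--     "Cleaning": 30,
--     "Consultation": 15,
--     "Checkup": 30,
--     "Check-up": 30,
--     "Tooth pain": 30,
--     "Extraction": 45,
--     "Filling": 45,
--     "Crown": 60,
--     "Root canal": 90,
--     "Emergency": 30,
-- }
--
-- def get_duration_for_service(service: str, schedule: Dict[str, Any]) -> int: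
--     """
--     Lookup treatment duration from schedule config.
--     Returns duration in minutes, defaults to 60 if not found.
--     """
--     durations = schedule.get("treatment_durations") or DEFAULT_TREATMENT_DURATIONS
--
--     # Try exact match first
--     if service in durations:
--         return durations[service]
--
--     # Try case-insensitive match
--     service_lower = service.lower()
--     for key, mins in durations.items():
--         if key.lower() == service_lower:
--             return mins
--
--     # Try partial match
--     for key, mins in durations.items():
--         if key.lower() in service_lower or service_lower in key.lower():
--             return mins
--
--     return 60  # Default duration
-- ===== SOURCE B (Python) =====
-- from typing import Dict, Any
--
-- DEFAULT_TREATMENT_DURATIONS: Dict[str, int] = {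
--     "Teeth whitening": 60,
--     "Cleaning": 30,
--     "Consultation": 15,
--     "Checkup": 30,
--     "Check-up": 30,
--     "Tooth pain": 30,
--     "Extraction": 45,
--     "Filling": 45,
--     "Crown": 60,
--     "Root canal": 90,
--     "Emergency": 30,
-- }
--
-- def get_duration_for_service(service: str, schedule: Dict[str, Any]) -> int:
--     durations = schedule.get("treatment_durations") or DEFAULT_TREATMENT_DURATIONS
--     service_lower = service.lower()
--     ci = None
--     partial = None
--     for key, mins in durations.items():
--         if key == service:
--             return mins
--         kl = key.lower()
--         if ci is None and kl == service_lower: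
--             ci = mins
--         elif partial is None and (kl in service_lower or service_lower in kl):
--             partial = mins
--     if ci is not None:
--         return ci
--     if partial is not None:
--         return partial
--     return 60
-- ===== Notes on version B (the rewrite author's own statement) =====
-- stated objective: alternative
-- what changed: Replaces A's exact-membership check plus two further full scans of the durations dict by a single pass that returns immediately on an exact key match and otherwise records the first case-insensitive and first partial candidates, choosing between them after the loop.
import Mathlib
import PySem

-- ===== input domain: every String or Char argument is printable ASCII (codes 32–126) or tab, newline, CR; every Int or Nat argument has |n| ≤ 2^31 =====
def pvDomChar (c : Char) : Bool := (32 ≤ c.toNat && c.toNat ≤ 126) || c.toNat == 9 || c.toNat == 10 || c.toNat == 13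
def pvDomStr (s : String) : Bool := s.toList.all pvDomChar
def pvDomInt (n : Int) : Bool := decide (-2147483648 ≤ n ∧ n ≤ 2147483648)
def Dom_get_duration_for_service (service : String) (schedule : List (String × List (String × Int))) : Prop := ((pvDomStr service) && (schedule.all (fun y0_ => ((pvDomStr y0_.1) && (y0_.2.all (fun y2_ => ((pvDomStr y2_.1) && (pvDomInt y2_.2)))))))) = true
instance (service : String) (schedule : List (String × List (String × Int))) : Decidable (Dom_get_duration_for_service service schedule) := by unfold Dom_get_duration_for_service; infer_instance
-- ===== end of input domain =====

-- B replaces A's three sequential scans over the durations dict by a single pass that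
-- records the first case-insensitive and first partial candidates (objective: alternative, same cost).

-- shared context: the module constant and the line `durations = schedule.get("treatment_durations") or DEFAULT_TREATMENT_DURATIONS`,
-- identical in both Pythons
def pvDefaultDurations : List (String × Int) :=
  [("Teeth whitening", 60), ("Cleaning", 30), ("Consultation", 15), ("Checkup", 30),
   ("Check-up", 30), ("Tooth pain", 30), ("Extraction", 45), ("Filling", 45),
   ("Crown", 60), ("Root canal", 90), ("Emergency", 30)]

def pvDurations (schedule : List (String × List (String × Int))) : PySem.Dict String Int :=
  match (PySem.Dict.ofList schedule).get? "treatment_durations" with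
  | some l => if l.isEmpty then PySem.Dict.ofList pvDefaultDurations else PySem.Dict.ofList l
  | none => PySem.Dict.ofList pvDefaultDurations

-- ===== PORT A =====
-- `for key, mins in durations.items(): if key.lower() == service_lower: return mins`
def pvFindCI (sl : List Char) : List (String × Int) → Option Int
  | [] => none
  | (k, m) :: rest => if PySem.Chars.lower k.toList = sl then some m else pvFindCI sl rest

-- `for key, mins in durations.items(): if key.lower() in service_lower or service_lower in key.lower(): return mins`
def pvFindPartial (sl : List Char) : List (String × Int) → Option Int
  | [] => none
  | (k, m) :: rest =>
      if PySem.Chars.isIn (PySem.Chars.lower k.toList) sl || PySem.Chars.isIn sl (PySem.Chars.lower k.toList)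
      then some m else pvFindPartial sl rest

def get_duration_for_service (service : String) (schedule : List (String × List (String × Int))) : Int :=
  let durations := pvDurations schedule
  if durations.contains service then (durations.get? service).getD 0
  else
    let sl := PySem.Chars.lower service.toList
    match pvFindCI sl durations.items with
    | some m => m
    | none =>
      match pvFindPartial sl durations.items with
      | some m => m
      | none => 60

-- ===== PORT B =====
-- Source B's single loop: exact match returns immediately; first case-insensitive and first
-- partial candidates are recorded (never overwritten) and chosen in that order at the end.
def pvScan (service : String) (sl : List Char) :
    List (String × Int) → Option Int → Option Int → Int
  | [], ci, part =>
      match ci with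
      | some c => c
      | none => match part with
        | some p => p
        | none => 60
  | (k, m) :: rest, ci, part =>
      if k = service then m
      else
        let kl := PySem.Chars.lower k.toList
        if ci = none ∧ kl = sl then pvScan service sl rest (some m) part
        else if part = none ∧ (PySem.Chars.isIn kl sl || PySem.Chars.isIn sl kl) then
          pvScan service sl rest ci (some m)
        else pvScan service sl rest ci part

def get_duration_for_service_alt (service : String) (schedule : List (String × List (String × Int))) : Int :=
  pvScan service (PySem.Chars.lower service.toList) (pvDurations schedule).items none none

-- ===== PRECONDITION & SPEC =====
def Spec_get_duration_for_service (service : String) (schedule : List (String × List (String × Int))) (out : Int) : Prop := out = get_duration_for_service_alt service schedule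
instance (service : String) (schedule : List (String × List (String × Int))) (out : Int) : Decidable (Spec_get_duration_for_service service schedule out) := by unfold Spec_get_duration_for_service; infer_instance

-- ===== CLAIM (what is proved, stated in full; the proofs are below) =====
def Claim_equal_get_duration_for_service : Prop := ∀ (service : String) (schedule : List (String × List (String × Int))), Dom_get_duration_for_service service schedule → Spec_get_duration_for_service service schedule (get_duration_for_service service schedule)

-- ===== LEMMAS AND PROOFS =====

-- when some key equals `service`, the scan returns the value at the first such key
theorem pvScan_exact (service : String) (sl : List Char) (l : List (String × Int))
    (h : service ∈ l.map Prod.fst) (ci part : Option Int) :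
    pvScan service sl l ci part = ((l.find? (fun p => p.1 == service)).map Prod.snd).getD 0 := by
  induction l generalizing ci part with
  | nil => simp at h
  | cons hd tl ih =>
    obtain ⟨k, m⟩ := hd
    by_cases hk : k = service
    · subst hk
      simp [pvScan, List.find?]
    · have hmem : service ∈ tl.map Prod.fst := by
        simp at h
        rcases h with h | h
        · exact absurd h.symm hk
        · simpa using h
      have hne : (k == service) = false := by simp [hk]
      simp only [pvScan, if_neg hk, List.find?, hne]
      split_ifs <;> exact ih hmem _ _

-- when no key equals `service`, the scan returns the recorded/first CI match, else the
-- recorded/first partial match, else 60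
theorem pvScan_no_exact (service : String) (sl : List Char) (l : List (String × Int))
    (h : service ∉ l.map Prod.fst) (ci part : Option Int) :
    pvScan service sl l ci part =
      match ci.or (pvFindCI sl l) with
      | some m => m
      | none => ((part.or (pvFindPartial sl l)).getD 60) := by
  induction l generalizing ci part with
  | nil => cases ci <;> cases part <;> simp [pvScan, pvFindCI, pvFindPartial]
  | cons hd tl ih =>
    obtain ⟨k, m⟩ := hd
    have hk : k ≠ service := by
      intro hkeq; exact h (by simp [hkeq])
    have htl : service ∉ tl.map Prod.fst := fun hm => h (by simp [hm])
    simp only [pvScan, if_neg hk, pvFindCI, pvFindPartial]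
    by_cases hci : PySem.Chars.lower k.toList = sl
    · cases ci with
      | none => simp [hci, ih htl]
      | some c =>
        rw [if_neg (by simp)]
        split_ifs <;> simp [ih htl]
    · rw [if_neg (by simp [hci])]
      by_cases hpcond : (PySem.Chars.isIn (PySem.Chars.lower k.toList) sl || PySem.Chars.isIn sl (PySem.Chars.lower k.toList)) = true
      · cases part with
        | none => simp [hpcond, hci, ih htl]
        | some p =>
          rw [if_neg (by simp)]
          simp [hpcond, hci, ih htl]
      · rw [if_neg (by simp [hpcond])]
        simp only [ih htl]
        simp [hci, hpcond]

-- ===== VERDICT (by name: the statement is the Claim_ definition above) =====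
theorem get_duration_for_service_spec : Claim_equal_get_duration_for_service := by
  intro service schedule _
  unfold Spec_get_duration_for_service get_duration_for_service get_duration_for_service_alt
  set d := pvDurations schedule with hd
  by_cases hc : d.contains service = true
  · have hmem : service ∈ d.items.map Prod.fst := by
      simp only [PySem.Dict.contains, List.any_eq_true] at hc
      rcases hc with ⟨p, hp, hpe⟩
      exact List.mem_map.2 ⟨p, hp, by simpa using hpe⟩
    rw [if_pos hc, pvScan_exact service _ _ hmem]
    simp [PySem.Dict.get?]
  · have hmem : service ∉ d.items.map Prod.fst := by
      intro hm
      apply hc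
      simp only [PySem.Dict.contains, List.any_eq_true]
      rcases List.mem_map.1 hm with ⟨p, hp, hpe⟩
      exact ⟨p, hp, by simp [hpe]⟩
    rw [if_neg hc, pvScan_no_exact service _ _ hmem]
    simp only [Option.none_or]
    cases pvFindCI (PySem.Chars.lower service.toList) d.items with
    | some m => rfl
    | none =>
      cases pvFindPartial (PySem.Chars.lower service.toList) d.items with
      | some m => rfl
      | none => rfl
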